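-- pv_equiv track=rewrite | github.com/GISMO-1/GISMO | gismo/web/api.py | _chat_action_label
-- ===== SOURCE A (Python) =====
-- from typing import Any
--
-- def _chat_action_label(action: dict[str, Any]) -> str:
--     why = str(action.get("why") or "").strip()
--     if why:
--         return why
--     command = str(action.get("command") or "").strip()
--     for prefix in ("echo:", "note:", "shell:", "device:", "graph:"):
--         if command.lower().startswith(prefix):
--             return command[len(prefix):].strip()
--     return command
-- ===== SOURCE B (Python) =====
-- def _chat_action_label(action) -> str:
--     why = str(action.get("why") or "").strip()
--     if why:
--         return why
--     command = str(action.get("command") or "").strip()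
--     low = command.lower()
--     head, sep, _tail = low.partition(":")
--     if sep and head in {"echo", "note", "shell", "device", "graph"}:
--         return command[len(head) + 1:].strip()
--     return command
-- ===== Notes on version B (the rewrite author's own statement) =====
-- stated objective: idiomatic
-- what changed: Replaces the five-prefix startswith scan with a single partition at the first colon plus one set-membership test on the head, stripping the tail after the colon.
import Mathlib
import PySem

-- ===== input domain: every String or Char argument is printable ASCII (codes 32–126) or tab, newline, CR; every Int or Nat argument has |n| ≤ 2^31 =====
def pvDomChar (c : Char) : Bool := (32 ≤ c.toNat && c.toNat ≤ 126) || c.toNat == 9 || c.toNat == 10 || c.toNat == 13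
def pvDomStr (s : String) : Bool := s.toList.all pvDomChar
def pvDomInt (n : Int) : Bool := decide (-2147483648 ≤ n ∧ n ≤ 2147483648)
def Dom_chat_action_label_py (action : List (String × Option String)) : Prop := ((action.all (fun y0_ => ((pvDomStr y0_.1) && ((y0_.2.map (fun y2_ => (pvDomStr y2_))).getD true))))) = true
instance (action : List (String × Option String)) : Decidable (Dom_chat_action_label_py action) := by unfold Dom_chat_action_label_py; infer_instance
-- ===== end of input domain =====

-- B builds the label by partitioning the lowered command at its first colon and doing one
-- set-membership test on the head, instead of A's scan over five "<word>:" prefixes (idiomatic rewrite).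


-- str(action.get(k) or "") : first-match association-list lookup; None or a missing key gives ""
def pvGetStr (action : List (String × Option String)) (k : String) : String :=
  match action.lookup k with
  | some (some s) => s
  | _ => ""

-- ===== PORT A =====
-- the 'for prefix in (…): if command.lower().startswith(prefix): return command[len(prefix):].strip()' loop
def chatPrefixScan (command : List Char) : List (List Char) → List Char
  | [] => command
  | p :: ps =>
    if PySem.Chars.startswith (PySem.Chars.lower command) p then
      PySem.Chars.strip (PySem.Chars.slice command (some (p.length : Int)) none)
    else chatPrefixScan command ps

def chat_action_label_py (action : List (String × Option String)) : String :=
  let why := PySem.Str.strip (pvGetStr action "why")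
  if why ≠ "" then why
  else
    let command := PySem.Str.strip (pvGetStr action "command")
    String.ofList (chatPrefixScan command.toList
      ["echo:".toList, "note:".toList, "shell:".toList, "device:".toList, "graph:".toList])

-- ===== PORT B =====
def pvNotColon (c : Char) : Bool := c ≠ ':'

def chat_action_label_py_alt (action : List (String × Option String)) : String :=
  let why := PySem.Str.strip (pvGetStr action "why")
  if why ≠ "" then why
  else
    let command := PySem.Str.strip (pvGetStr action "command")
    let low := PySem.Chars.lower command.toList
    -- low.partition(":") ported by hand (PySem has no partition): head = the chars before the
    -- first ':'; 'sep' is truthy exactly when ':' occurs, i.e. head is shorter than low. Exact.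
    let head := low.takeWhile pvNotColon
    if head.length < low.length ∧
        head ∈ (["echo".toList, "note".toList, "shell".toList, "device".toList, "graph".toList] : List (List Char)) then
      -- command[len(head)+1:] : a Python slice with a nonnegative start is List.drop (exact)
      String.ofList (PySem.Chars.strip (command.toList.drop (head.length + 1)))
    else command

-- ===== PRECONDITION & SPEC =====
def Spec_chat_action_label_py (action : List (String × Option String)) (out : String) : Prop := out = chat_action_label_py_alt action
instance (action : List (String × Option String)) (out : String) : Decidable (Spec_chat_action_label_py action out) := by unfold Spec_chat_action_label_py; infer_instance

-- ===== CLAIM (what is proved, stated in full; the proofs are below) =====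
def Claim_equal_chat_action_label_py : Prop := ∀ (action : List (String × Option String)), Dom_chat_action_label_py action → Spec_chat_action_label_py action (chat_action_label_py action)

-- ===== LEMMAS AND PROOFS =====

lemma pv_takeWhile_append_colon (w r : List Char) (hw : ':' ∉ w) :
    (w ++ ':' :: r).takeWhile pvNotColon = w := by
  induction w with
  | nil => simp [pvNotColon]
  | cons a t ih =>
    simp only [List.mem_cons, not_or] at hw
    have ha : pvNotColon a = true := by
      simp [pvNotColon]; exact fun h => hw.1 h.symm
    simp only [List.cons_append, List.takeWhile_cons, ha, if_true, ih hw.2]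

-- command.lower().startswith("<w>:") characterised via the partition head
lemma pv_startswith_colon_iff (L w : List Char) (hw : ':' ∉ w) :
    PySem.Chars.startswith L (w ++ [':']) = true ↔
      (L.takeWhile pvNotColon = w ∧ w.length < L.length) := by
  rw [PySem.Chars.startswith_iff]
  constructor
  · rintro ⟨r, hr⟩
    have hL : L = w ++ ':' :: r := by simpa using hr.symm
    subst hL
    exact ⟨pv_takeWhile_append_colon w r hw, by simp⟩
  · rintro ⟨hh, hlen⟩
    have hsplit := List.takeWhile_append_dropWhile (p := pvNotColon) (l := L)
    cases hdw : L.dropWhile pvNotColon with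
    | nil =>
      exfalso
      rw [hdw, List.append_nil, hh] at hsplit
      have := congrArg List.length hsplit
      simp at this; omega
    | cons c t =>
      have hc : pvNotColon c = false := by
        have := List.head?_dropWhile_not pvNotColon L
        rw [hdw] at this; simp at this; exact this
      have hcol : c = ':' := by simpa [pvNotColon] using hc
      refine ⟨t, ?_⟩
      rw [← hsplit, hdw, hh, hcol]
      simp

-- a failing prefix test, as a Bool equation the scan can be unfolded with
lemma pv_startswith_colon_false (L w : List Char) (hw : ':' ∉ w)
    (hn : ¬ (L.takeWhile pvNotColon = w ∧ w.length < L.length)) :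
    PySem.Chars.startswith L (w ++ [':']) = false := by
  cases h : PySem.Chars.startswith L (w ++ [':']) with
  | false => rfl
  | true => exact absurd ((pv_startswith_colon_iff L w hw).mp h) hn

-- A's five-prefix scan computes exactly B's partition-and-lookup
lemma pv_scan_eq (cmd : List Char) :
    chatPrefixScan cmd ["echo:".toList, "note:".toList, "shell:".toList, "device:".toList, "graph:".toList]
    =
    (if ((PySem.Chars.lower cmd).takeWhile pvNotColon).length < (PySem.Chars.lower cmd).length ∧
         (PySem.Chars.lower cmd).takeWhile pvNotColon ∈
           (["echo".toList, "note".toList, "shell".toList, "device".toList, "graph".toList] : List (List Char)) then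
       PySem.Chars.strip (cmd.drop (((PySem.Chars.lower cmd).takeWhile pvNotColon).length + 1))
     else cmd) := by
  have hsl : ∀ (n : Nat), PySem.Chars.slice cmd (some (n : Int)) none = cmd.drop n := by
    intro n
    rw [PySem.Chars.slice_eq_listSlice]
    exact PySem.List.slice_from cmd (Int.natCast_nonneg n)
  have he : ("echo:".toList : List Char) = "echo".toList ++ [':'] := rfl
  have hn : ("note:".toList : List Char) = "note".toList ++ [':'] := rfl
  have hs : ("shell:".toList : List Char) = "shell".toList ++ [':'] := rfl
  have hd : ("device:".toList : List Char) = "device".toList ++ [':'] := rfl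
  have hg : ("graph:".toList : List Char) = "graph".toList ++ [':'] := rfl
  have hmiss : ∀ w : List Char, ':' ∉ w →
      List.takeWhile pvNotColon (PySem.Chars.lower cmd) ≠ w →
      PySem.Chars.startswith (PySem.Chars.lower cmd) (w ++ [':']) = false :=
    fun w hw hne => pv_startswith_colon_false _ _ hw (fun hc => hne hc.1)
  by_cases hcol :
      ((PySem.Chars.lower cmd).takeWhile pvNotColon).length < (PySem.Chars.lower cmd).length
  · by_cases hm : (PySem.Chars.lower cmd).takeWhile pvNotColon ∈
        (["echo".toList, "note".toList, "shell".toList, "device".toList, "graph".toList] : List (List Char))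
    · rw [if_pos ⟨hcol, hm⟩]
      simp only [List.mem_cons, List.not_mem_nil, or_false] at hm
      rcases hm with h | h | h | h | h
      · simp only [chatPrefixScan, he, hn, hs, hd, hg,
          hmiss "note".toList (by decide) (by rw [h]; decide),
          hmiss "shell".toList (by decide) (by rw [h]; decide),
          hmiss "device".toList (by decide) (by rw [h]; decide),
          hmiss "graph".toList (by decide) (by rw [h]; decide),
          (pv_startswith_colon_iff _ _ (by decide)).mpr ⟨h, h ▸ hcol⟩,
          Bool.false_eq_true, if_false, hsl]
        rw [h]
        simp
      · simp only [chatPrefixScan, he, hn, hs, hd, hg,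
          hmiss "echo".toList (by decide) (by rw [h]; decide),
          hmiss "shell".toList (by decide) (by rw [h]; decide),
          hmiss "device".toList (by decide) (by rw [h]; decide),
          hmiss "graph".toList (by decide) (by rw [h]; decide),
          (pv_startswith_colon_iff _ _ (by decide)).mpr ⟨h, h ▸ hcol⟩,
          Bool.false_eq_true, if_false, hsl]
        rw [h]
        simp
      · simp only [chatPrefixScan, he, hn, hs, hd, hg,
          hmiss "echo".toList (by decide) (by rw [h]; decide),
          hmiss "note".toList (by decide) (by rw [h]; decide),
          hmiss "device".toList (by decide) (by rw [h]; decide),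
          hmiss "graph".toList (by decide) (by rw [h]; decide),
          (pv_startswith_colon_iff _ _ (by decide)).mpr ⟨h, h ▸ hcol⟩,
          Bool.false_eq_true, if_false, hsl]
        rw [h]
        simp
      · simp only [chatPrefixScan, he, hn, hs, hd, hg,
          hmiss "echo".toList (by decide) (by rw [h]; decide),
          hmiss "note".toList (by decide) (by rw [h]; decide),
          hmiss "shell".toList (by decide) (by rw [h]; decide),
          hmiss "graph".toList (by decide) (by rw [h]; decide),
          (pv_startswith_colon_iff _ _ (by decide)).mpr ⟨h, h ▸ hcol⟩,
          Bool.false_eq_true, if_false, hsl]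
        rw [h]
        simp
      · simp only [chatPrefixScan, he, hn, hs, hd, hg,
          hmiss "echo".toList (by decide) (by rw [h]; decide),
          hmiss "note".toList (by decide) (by rw [h]; decide),
          hmiss "shell".toList (by decide) (by rw [h]; decide),
          hmiss "device".toList (by decide) (by rw [h]; decide),
          (pv_startswith_colon_iff _ _ (by decide)).mpr ⟨h, h ▸ hcol⟩,
          Bool.false_eq_true, if_false, hsl]
        rw [h]
        simp
    · rw [if_neg (by tauto)]
      simp only [chatPrefixScan, he, hn, hs, hd, hg,
        hmiss "echo".toList (by decide) (fun hx => hm (by rw [hx]; simp)),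
        hmiss "note".toList (by decide) (fun hx => hm (by rw [hx]; simp)),
        hmiss "shell".toList (by decide) (fun hx => hm (by rw [hx]; simp)),
        hmiss "device".toList (by decide) (fun hx => hm (by rw [hx]; simp)),
        hmiss "graph".toList (by decide) (fun hx => hm (by rw [hx]; simp)),
        Bool.false_eq_true, if_false]
  · rw [if_neg (by tauto)]
    have hmiss2 : ∀ w : List Char, ':' ∉ w →
        PySem.Chars.startswith (PySem.Chars.lower cmd) (w ++ [':']) = false :=
      fun w hw => pv_startswith_colon_false _ _ hw
        (fun hc => hcol (by rw [hc.1]; exact hc.2))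
    simp only [chatPrefixScan, he, hn, hs, hd, hg,
      hmiss2 "echo".toList (by decide),
      hmiss2 "note".toList (by decide),
      hmiss2 "shell".toList (by decide),
      hmiss2 "device".toList (by decide),
      hmiss2 "graph".toList (by decide),
      Bool.false_eq_true, if_false]

-- ===== VERDICT (by name: the statement is the Claim_ definition above) =====
theorem chat_action_label_py_spec : Claim_equal_chat_action_label_py := by
  unfold Claim_equal_chat_action_label_py
  intro action _
  unfold Spec_chat_action_label_py chat_action_label_py chat_action_label_py_alt
  by_cases hwhy : PySem.Str.strip (pvGetStr action "why") ≠ ""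
  · rw [if_pos hwhy, if_pos hwhy]
  · rw [if_neg hwhy, if_neg hwhy]
    dsimp only
    rw [pv_scan_eq]
    split_ifs
    · rfl
    · exact String.ofList_toList
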